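-- pv_equiv track=rewrite | github.com/kevinim/PythonPractice | 키패드누르기2.py | solution
-- ===== SOURCE A (Python) =====
-- def solution(numbers, hand):
--     left_key = [1, 4, 7]
--     right_key = [3, 6, 9]
--     hand_position = ['*', '#']
--
--     position = {
--         1: (0, 0), 2: (0, 1), 3:(0, 2),
--         4: (1, 0), 5: (1, 1), 6:(1, 2),
--         7: (2, 0), 8: (2, 1), 9:(2, 2),
--         '*': (3, 0), 0: (3, 1), '#': (3, 2),
--     }
--
--     result = ''
--     for num in numbers :
--         if num in left_key:
--             #왼손
--             result += 'L'
--             hand_position[0] = num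
--         elif num in right_key:
--             #오른손
--             result += 'R'
--             hand_position[1] = num
--         else :
--             #더가까운손
--             near_hand = get_near_hand(position, hand_position[0], hand_position[1], num, hand)
--             if near_hand == 'L' :
--                 #왼손
--                 result += 'L'
--                 hand_position[0] = num
--             else :
--                 #오른손
--                 result += 'R'
--                 hand_position[1] = num
--
--     return result
--
-- def get_near_hand(position, l, r, num, hand) :
--     left_distance = abs(position[l][0] - position[num][0]) + abs(position[l][1] - position[num][1])
--     right_distance = abs(position[r][0] - position[num][0]) + abs(position[r][1] - position[num][1])
--
--     #거리가 동일하면 hand값에 따라 반환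
--     if left_distance == right_distance :
--         near_hand = 'L' if hand == 'left' else 'R'
--     else :
--         #더가까운손
--         near_hand = 'L' if left_distance < right_distance else 'R'
--     return near_hand
-- ===== SOURCE B (Python) =====
-- def _trans(s, d, tie):
--     # decode state: left thumb (row lr, on-middle flag lm), right thumb (rr, rm)
--     rm = s % 2
--     rr = (s // 2) % 4
--     lm = (s // 8) % 2
--     lr = s // 16
--     if d % 3 == 1 and d != 0:          # left column 1, 4, 7
--         return 'L', ((d // 3) * 2) * 8 + rr * 2 + rm
--     if d % 3 == 0 and d != 0:          # right column 3, 6, 9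
--         return 'R', (lr * 2 + lm) * 8 + (d // 3 - 1) * 2
--     r = 3 if d == 0 else d // 3        # middle column: 2, 5, 8, 0
--     dl = abs(lr - r) + (1 - lm)        # a side-column thumb is 1 step off the middle
--     dr = abs(rr - r) + (1 - rm)
--     if dl < dr or (dl == dr and tie == 'L'):
--         return 'L', (r * 2 + 1) * 8 + rr * 2 + rm
--     return 'R', (lr * 2 + lm) * 8 + r * 2 + 1
--
--
-- def solution(numbers, hand):
--     # Compile the keypad rules into an explicit 64-state finite-state transducer
--     # (state = row + middle-column flag of each thumb), then run it: the per-digit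
--     # loop is a pure table transition, no coordinates or distances at run time.
--     tie = 'L' if hand == 'left' else 'R'
--     table = [_trans(s, d, tie) for s in range(64) for d in range(10)]
--     s = 3 * 16 + 3 * 2                 # left thumb on '*' row 3 side, right on '#' row 3 side
--     out = []
--     for d in numbers:
--         letter, s = table[s * 10 + d]
--         out.append(letter)
--     return ''.join(out)
-- ===== Notes on version B (the rewrite author's own statement) =====
-- stated objective: alternative
-- what changed: B compiles the keypad rules into an explicit 64-state finite-state transducer (state = row plus a middle-column flag for each thumb, which is all the distance rule depends on), builds its full transition table once, and then produces the answer by pure table-driven state transitions with no coordinates, distances or hand classification in the main loop.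
import Mathlib
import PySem

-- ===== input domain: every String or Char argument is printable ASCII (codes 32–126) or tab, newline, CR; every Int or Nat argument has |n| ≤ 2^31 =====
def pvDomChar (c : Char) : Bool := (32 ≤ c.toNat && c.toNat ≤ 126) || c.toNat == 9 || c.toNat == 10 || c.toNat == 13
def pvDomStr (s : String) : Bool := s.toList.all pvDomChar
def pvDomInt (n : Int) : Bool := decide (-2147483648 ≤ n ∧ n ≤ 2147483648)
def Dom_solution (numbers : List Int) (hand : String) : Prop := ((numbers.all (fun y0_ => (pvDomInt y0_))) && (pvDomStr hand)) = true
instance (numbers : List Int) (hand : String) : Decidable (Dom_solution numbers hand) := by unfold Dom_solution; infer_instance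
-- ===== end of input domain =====

-- B compiles the keypad rules into a 64-state finite transducer built once and then runs it by
-- pure table lookups; same asymptotic cost, no speed claim. Equivalence is about the return value.

-- ===== PORT A =====
-- A's hand_position slots hold '*'/'#' initially and digits afterwards; modelled by AKey.
inductive AKey : Type
  | star : AKey
  | hash : AKey
  | dig : Int → AKey
deriving DecidableEq, Repr

-- the position dict restricted to digit keys; outside 0..9 Python raises KeyError (excluded by Pre_),
-- the junk value (0,0) there is never relied upon
def pvPosDigit (n : Int) : Int × Int :=
  if n = 1 then (0,0) else if n = 2 then (0,1) else if n = 3 then (0,2)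
  else if n = 4 then (1,0) else if n = 5 then (1,1) else if n = 6 then (1,2)
  else if n = 7 then (2,0) else if n = 8 then (2,1) else if n = 9 then (2,2)
  else if n = 0 then (3,1) else (0,0)

def pvPos : AKey → Int × Int
  | .star => (3,0)
  | .hash => (3,2)
  | .dig n => pvPosDigit n

-- get_near_hand, step for step
def get_near_hand (l r : AKey) (num : Int) (hand : String) : String :=
  let ld := |(pvPos l).1 - (pvPosDigit num).1| + |(pvPos l).2 - (pvPosDigit num).2|
  let rd := |(pvPos r).1 - (pvPosDigit num).1| + |(pvPos r).2 - (pvPosDigit num).2|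
  if ld = rd then (if hand = "left" then "L" else "R")
  else (if ld < rd then "L" else "R")

-- the loop body of A
def stepA (hand : String) (st : AKey × AKey × String) (num : Int) : AKey × AKey × String :=
  if [(1:Int),4,7].contains num then (.dig num, st.2.1, st.2.2 ++ "L")
  else if [(3:Int),6,9].contains num then (st.1, .dig num, st.2.2 ++ "R")
  else if get_near_hand st.1 st.2.1 num hand = "L" then (.dig num, st.2.1, st.2.2 ++ "L")
  else (st.1, .dig num, st.2.2 ++ "R")

def solution (numbers : List Int) (hand : String) : String :=
  (numbers.foldl (stepA hand) (AKey.star, AKey.hash, "")).2.2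

-- ===== PORT B =====
-- _trans: one transition of the transducer; state s encodes (left row, left on-middle, right row, right on-middle)
def transB (s d : Int) (tie : String) : String × Int :=
  let rm := PySem.Int.mod s 2
  let rr := PySem.Int.mod (PySem.Int.floordiv s 2) 4
  let lm := PySem.Int.mod (PySem.Int.floordiv s 8) 2
  let lr := PySem.Int.floordiv s 16
  if PySem.Int.mod d 3 = 1 ∧ d ≠ 0 then
    ("L", (PySem.Int.floordiv d 3 * 2) * 8 + rr * 2 + rm)
  else if PySem.Int.mod d 3 = 0 ∧ d ≠ 0 then
    ("R", (lr * 2 + lm) * 8 + (PySem.Int.floordiv d 3 - 1) * 2)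
  else
    let r := if d = 0 then 3 else PySem.Int.floordiv d 3
    let dl := |lr - r| + (1 - lm)
    let dr := |rr - r| + (1 - rm)
    if dl < dr ∨ (dl = dr ∧ tie = "L") then ("L", (r * 2 + 1) * 8 + rr * 2 + rm)
    else ("R", (lr * 2 + lm) * 8 + r * 2 + 1)

-- the table comprehension [_trans(s, d, tie) for s in range(64) for d in range(10)]
def tableB (tie : String) : List (String × Int) :=
  (PySem.List.pyRange 0 64 1).flatMap (fun s => (PySem.List.pyRange 0 10 1).map (fun d => transB s d tie))

-- the loop body of B: letter, s = table[s * 10 + d]; out.append(letter)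
-- (on an out-of-range index Python raises IndexError — those inputs are outside Pre_; the none branch is unreachable there)
def stepB (table : List (String × Int)) (st : Int × List String) (d : Int) : Int × List String :=
  match PySem.List.pyGet? table (st.1 * 10 + d) with
  | some p => (p.2, st.2 ++ [p.1])
  | none => st

def solution_alt (numbers : List Int) (hand : String) : String :=
  let tie := if hand = "left" then "L" else "R"
  let table := tableB tie
  let res := numbers.foldl (stepB table) (3 * 16 + 3 * 2, [])
  PySem.Str.join "" res.2

-- ===== PRECONDITION & SPEC =====
-- Pre_ excludes numbers outside 0..9: there A's position-dict lookup raises KeyError.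
def Pre_solution (numbers : List Int) (hand : String) : Prop :=
  ∀ n ∈ numbers, 0 ≤ n ∧ n ≤ 9

instance (numbers : List Int) (hand : String) : Decidable (Pre_solution numbers hand) := by
  unfold Pre_solution; infer_instance

def pvWitness_solution : List Int × String := ([1, 3, 4, 5, 8, 2, 1, 4, 5, 9, 5], "right")

def Spec_solution (numbers : List Int) (hand : String) (out : String) : Prop := out = solution_alt numbers hand
instance (numbers : List Int) (hand : String) (out : String) : Decidable (Spec_solution numbers hand out) := by unfold Spec_solution; infer_instance

-- ===== CLAIM (what is proved, stated in full; the proofs are below) =====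
def Claim_equal_solution : Prop := ∀ (numbers : List Int) (hand : String), Dom_solution numbers hand → Pre_solution numbers hand → Spec_solution numbers hand (solution numbers hand)

-- ===== LEMMAS AND PROOFS =====

theorem pvInterNil (l : List (List Char)) : (List.intersperse ([] : List Char) l).flatten = l.flatten := by
  induction l with
  | nil => rfl
  | cons a t ih =>
    cases t with
    | nil => rfl
    | cons b t' => simp_all [List.intersperse_cons₂]

theorem pvJoinSnoc (out : List String) (x : String) :
    PySem.Str.join "" (out ++ [x]) = PySem.Str.join "" out ++ x := by
  simp [PySem.Str.join, PySem.Chars.join, List.intercalate, pvInterNil, String.ofList_append,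
    String.ofList_toList]

-- indexing the compiled table: table[s*10+d] is exactly transB s d tie
theorem pvTableLookup (tie : String) (s d : Int) (hs0 : 0 ≤ s) (hs1 : s < 64)
    (hd0 : 0 ≤ d) (hd1 : d < 10) :
    PySem.List.pyGet? (tableB tie) (s * 10 + d) = some (transB s d tie) := by
  unfold tableB
  rw [PySem.List.pyRange_one_append 0 s 64 hs0 (le_of_lt hs1),
      PySem.List.pyRange_one_cons hs1, List.flatMap_append, List.flatMap_cons]
  have hlen : ((PySem.List.pyRange 0 s 1).flatMap
      (fun s' => (PySem.List.pyRange 0 10 1).map (fun d' => transB s' d' tie))).length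
      = s.toNat * 10 := by
    rw [List.length_flatMap]
    simp [PySem.List.length_pyRange_one]
  have hidx : s * 10 + d =
      (((PySem.List.pyRange 0 s 1).flatMap
        (fun s' => (PySem.List.pyRange 0 10 1).map (fun d' => transB s' d' tie))).length : Int)
      + (d.toNat : Int) := by
    rw [hlen]; omega
  rw [hidx, PySem.List.pyGet?_append_right]
  rw [List.getElem?_append_left (by simp [PySem.List.length_pyRange_one]; omega)]
  have h10 : (10 : Int) = ((10 : Nat) : Int) := by norm_num
  rw [h10, PySem.List.getElem?_map_pyRange_zero _ 10 d.toNat (by omega),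
      Int.toNat_of_nonneg hd0]

-- decoding the state encoding inside transB
theorem pvExtract (lr lm rr rm : Int) (h1 : 0 ≤ lr) (h2 : lr ≤ 3) (h3 : lm = 0 ∨ lm = 1)
    (h4 : 0 ≤ rr) (h5 : rr ≤ 3) (h6 : rm = 0 ∨ rm = 1) :
    PySem.Int.mod (lr*16 + lm*8 + rr*2 + rm) 2 = rm ∧
    PySem.Int.mod (PySem.Int.floordiv (lr*16 + lm*8 + rr*2 + rm) 2) 4 = rr ∧
    PySem.Int.mod (PySem.Int.floordiv (lr*16 + lm*8 + rr*2 + rm) 8) 2 = lm ∧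
    PySem.Int.floordiv (lr*16 + lm*8 + rr*2 + rm) 16 = lr := by
  rw [PySem.Int.mod_eq_emod_of_pos (by norm_num), PySem.Int.mod_eq_emod_of_pos (by norm_num),
      PySem.Int.mod_eq_emod_of_pos (by norm_num), PySem.Int.floordiv_eq_ediv_of_pos (by norm_num),
      PySem.Int.floordiv_eq_ediv_of_pos (by norm_num), PySem.Int.floordiv_eq_ediv_of_pos (by norm_num)]
  omega

-- the state relation: B's transducer state encodes the rows and middle-column flags of A's keys,
-- and B's collected letters join to A's accumulated string
def PVInv (a : AKey × AKey × String) (b : Int × List String) : Prop :=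
  ∃ lr lm rr rm : Int, 0 ≤ lr ∧ lr ≤ 3 ∧ (lm = 0 ∨ lm = 1) ∧ 0 ≤ rr ∧ rr ≤ 3 ∧ (rm = 0 ∨ rm = 1) ∧
    b.1 = lr*16 + lm*8 + rr*2 + rm ∧
    (pvPos a.1).1 = lr ∧ |(pvPos a.1).2 - 1| = 1 - lm ∧
    (pvPos a.2.1).1 = rr ∧ |(pvPos a.2.1).2 - 1| = 1 - rm ∧
    PySem.Str.join "" b.2 = a.2.2

theorem pvTieL (hand : String) : ((if hand = "left" then "L" else "R") = "L") ↔ hand = "left" := by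
  split_ifs <;> simp_all

theorem pvNearL (ld rd : Int) (hand : String) :
    ((if ld = rd then (if hand = "left" then "L" else "R")
      else (if ld < rd then "L" else "R")) = "L")
    ↔ (ld < rd ∨ (ld = rd ∧ hand = "left")) := by
  split_ifs <;> simp_all

theorem pvStepRel (hand : String) (a : AKey × AKey × String) (b : Int × List String)
    (h : PVInv a b) (d : Int) (hd0 : 0 ≤ d) (hd1 : d ≤ 9) :
    PVInv (stepA hand a d) (stepB (tableB (if hand = "left" then "L" else "R")) b d) := by
  obtain ⟨kL, kR, acc⟩ := a
  obtain ⟨s, out⟩ := b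
  obtain ⟨lr, lm, rr, rm, h1, h2, h3, h4, h5, h6, hs, hL1, hL2, hR1, hR2, hj⟩ := h
  simp only at hs hL1 hL2 hR1 hR2 hj
  obtain ⟨e1, e2, e3, e4⟩ := pvExtract lr lm rr rm h1 h2 h3 h4 h5 h6
  have hlook := pvTableLookup (if hand = "left" then "L" else "R") s d
    (by omega) (by omega) hd0 (by omega)
  simp only [stepB, hlook]
  subst hs
  interval_cases d
  · -- d = 0: middle column, row 3
    simp only [stepA, get_near_hand, transB, e1, e2, e3, e4, pvTieL, pvPosDigit]
    norm_num
    rw [if_congr (pvNearL _ _ hand) rfl rfl]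
    simp only [hL1, hL2, hR1, hR2]
    split_ifs with hc
    · exact ⟨3, 1, rr, rm, by norm_num, by norm_num, by norm_num, h4, h5, h6, by ring,
        by norm_num [pvPos, pvPosDigit], by norm_num [pvPos, pvPosDigit], hR1, hR2, by rw [pvJoinSnoc, hj]⟩
    · exact ⟨lr, lm, 3, 1, h1, h2, h3, by norm_num, by norm_num, by norm_num, by ring,
        hL1, hL2, by norm_num [pvPos, pvPosDigit], by norm_num [pvPos, pvPosDigit], by rw [pvJoinSnoc, hj]⟩
  · -- d = 1: left column
    simp only [stepA, get_near_hand, transB, e1, e2, e3, e4, pvTieL, pvPosDigit]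
    norm_num
    exact ⟨0, 0, rr, rm, by norm_num, by norm_num, by norm_num, h4, h5, h6, by ring,
      by norm_num [pvPos, pvPosDigit], by norm_num [pvPos, pvPosDigit], hR1, hR2, by rw [pvJoinSnoc, hj]⟩
  · -- d = 2: middle column, row 0
    simp only [stepA, get_near_hand, transB, e1, e2, e3, e4, pvTieL, pvPosDigit]
    norm_num
    rw [if_congr (pvNearL _ _ hand) rfl rfl]
    simp only [hL1, hL2, hR1, hR2]
    split_ifs with hc
    · exact ⟨0, 1, rr, rm, by norm_num, by norm_num, by norm_num, h4, h5, h6, by ring,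
        by norm_num [pvPos, pvPosDigit], by norm_num [pvPos, pvPosDigit], hR1, hR2, by rw [pvJoinSnoc, hj]⟩
    · exact ⟨lr, lm, 0, 1, h1, h2, h3, by norm_num, by norm_num, by norm_num, by ring,
        hL1, hL2, by norm_num [pvPos, pvPosDigit], by norm_num [pvPos, pvPosDigit], by rw [pvJoinSnoc, hj]⟩
  · -- d = 3: right column
    simp only [stepA, get_near_hand, transB, e1, e2, e3, e4, pvTieL, pvPosDigit]
    norm_num
    exact ⟨lr, lm, 0, 0, h1, h2, h3, by norm_num, by norm_num, by norm_num, by ring,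
      hL1, hL2, by norm_num [pvPos, pvPosDigit], by norm_num [pvPos, pvPosDigit], by rw [pvJoinSnoc, hj]⟩
  · -- d = 4: left column
    simp only [stepA, get_near_hand, transB, e1, e2, e3, e4, pvTieL, pvPosDigit]
    norm_num
    exact ⟨1, 0, rr, rm, by norm_num, by norm_num, by norm_num, h4, h5, h6, by ring,
      by norm_num [pvPos, pvPosDigit], by norm_num [pvPos, pvPosDigit], hR1, hR2, by rw [pvJoinSnoc, hj]⟩
  · -- d = 5: middle column, row 1
    simp only [stepA, get_near_hand, transB, e1, e2, e3, e4, pvTieL, pvPosDigit]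
    norm_num
    rw [if_congr (pvNearL _ _ hand) rfl rfl]
    simp only [hL1, hL2, hR1, hR2]
    split_ifs with hc
    · exact ⟨1, 1, rr, rm, by norm_num, by norm_num, by norm_num, h4, h5, h6, by ring,
        by norm_num [pvPos, pvPosDigit], by norm_num [pvPos, pvPosDigit], hR1, hR2, by rw [pvJoinSnoc, hj]⟩
    · exact ⟨lr, lm, 1, 1, h1, h2, h3, by norm_num, by norm_num, by norm_num, by ring,
        hL1, hL2, by norm_num [pvPos, pvPosDigit], by norm_num [pvPos, pvPosDigit], by rw [pvJoinSnoc, hj]⟩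
  · -- d = 6: right column
    simp only [stepA, get_near_hand, transB, e1, e2, e3, e4, pvTieL, pvPosDigit]
    norm_num
    exact ⟨lr, lm, 1, 0, h1, h2, h3, by norm_num, by norm_num, by norm_num, by ring,
      hL1, hL2, by norm_num [pvPos, pvPosDigit], by norm_num [pvPos, pvPosDigit], by rw [pvJoinSnoc, hj]⟩
  · -- d = 7: left column
    simp only [stepA, get_near_hand, transB, e1, e2, e3, e4, pvTieL, pvPosDigit]
    norm_num
    exact ⟨2, 0, rr, rm, by norm_num, by norm_num, by norm_num, h4, h5, h6, by ring,
      by norm_num [pvPos, pvPosDigit], by norm_num [pvPos, pvPosDigit], hR1, hR2, by rw [pvJoinSnoc, hj]⟩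
  · -- d = 8: middle column, row 2
    simp only [stepA, get_near_hand, transB, e1, e2, e3, e4, pvTieL, pvPosDigit]
    norm_num
    rw [if_congr (pvNearL _ _ hand) rfl rfl]
    simp only [hL1, hL2, hR1, hR2]
    split_ifs with hc
    · exact ⟨2, 1, rr, rm, by norm_num, by norm_num, by norm_num, h4, h5, h6, by ring,
        by norm_num [pvPos, pvPosDigit], by norm_num [pvPos, pvPosDigit], hR1, hR2, by rw [pvJoinSnoc, hj]⟩
    · exact ⟨lr, lm, 2, 1, h1, h2, h3, by norm_num, by norm_num, by norm_num, by ring,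
        hL1, hL2, by norm_num [pvPos, pvPosDigit], by norm_num [pvPos, pvPosDigit], by rw [pvJoinSnoc, hj]⟩
  · -- d = 9: right column
    simp only [stepA, get_near_hand, transB, e1, e2, e3, e4, pvTieL, pvPosDigit]
    norm_num
    exact ⟨lr, lm, 2, 0, h1, h2, h3, by norm_num, by norm_num, by norm_num, by ring,
      hL1, hL2, by norm_num [pvPos, pvPosDigit], by norm_num [pvPos, pvPosDigit], by rw [pvJoinSnoc, hj]⟩

theorem pvFoldRel (hand : String) (numbers : List Int)
    (hp : ∀ n ∈ numbers, 0 ≤ n ∧ n ≤ 9) :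
    ∀ (a : AKey × AKey × String) (b : Int × List String), PVInv a b →
      PVInv (numbers.foldl (stepA hand) a)
        (numbers.foldl (stepB (tableB (if hand = "left" then "L" else "R"))) b) := by
  induction numbers with
  | nil => intro a b h; simpa using h
  | cons x xs ih =>
    intro a b h
    simp only [List.foldl_cons]
    exact ih (fun n hn => hp n (List.mem_cons_of_mem _ hn)) _ _
      (pvStepRel hand a b h x (hp x List.mem_cons_self).1 (hp x List.mem_cons_self).2)

-- ===== VERDICT (by name: the statement is the Claim_ definition above) =====
theorem solution_spec : Claim_equal_solution := by
  intro numbers hand _ hpre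
  have h0 : PVInv (AKey.star, AKey.hash, "") ((3 * 16 + 3 * 2 : Int), ([] : List String)) := by
    exact ⟨3, 0, 3, 0, by norm_num, by norm_num, Or.inl rfl, by norm_num, by norm_num, Or.inl rfl,
      by norm_num, by simp [pvPos], by simp [pvPos], by simp [pvPos], by simp [pvPos], rfl⟩
  have h := pvFoldRel hand numbers hpre _ _ h0
  obtain ⟨_, _, _, _, _, _, _, _, _, _, _, _, _, _, _, hj⟩ := h
  unfold Spec_solution solution solution_alt
  exact hj.symm
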